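-- pv_equiv track=rewrite | github.com/yspreen/advent2020 | 2023/17/main.py | same_dir
-- ===== SOURCE A (Python) =====
-- def same_dir(pos, new_pos, origin, max_length=3):
--     p = pos
--     c = 0
--     v = (new_pos[0] - p[0], new_pos[1] - p[1])
--     while p in origin and c < max_length:
--         prev = origin[p]
--         if (p[0] - prev[0], p[1] - prev[1]) != v:
--             return False
--         p = prev
--         c += 1
--     return c == max_length
-- ===== SOURCE B (Python) =====
-- def same_dir(pos, new_pos, origin, max_length=3):
--     if max_length <= 0:
--         return max_length == 0
--     v = (new_pos[0] - pos[0], new_pos[1] - pos[1])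
--
--     def walk(p, remaining):
--         if remaining == 0:
--             return True
--         if p not in origin:
--             return False
--         prev = origin[p]
--         if (p[0] - prev[0], p[1] - prev[1]) != v:
--             return False
--         return walk(prev, remaining - 1)
--
--     return walk(pos, max_length)
-- ===== Notes on version B (the rewrite author's own statement) =====
-- stated objective: alternative
-- what changed: Replaces A's while-loop with mutable (p, c) state counting up to max_length by an early total guard on max_length plus a recursive walk over the parent chain counting the remaining steps down to zero.
import Mathlib
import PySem

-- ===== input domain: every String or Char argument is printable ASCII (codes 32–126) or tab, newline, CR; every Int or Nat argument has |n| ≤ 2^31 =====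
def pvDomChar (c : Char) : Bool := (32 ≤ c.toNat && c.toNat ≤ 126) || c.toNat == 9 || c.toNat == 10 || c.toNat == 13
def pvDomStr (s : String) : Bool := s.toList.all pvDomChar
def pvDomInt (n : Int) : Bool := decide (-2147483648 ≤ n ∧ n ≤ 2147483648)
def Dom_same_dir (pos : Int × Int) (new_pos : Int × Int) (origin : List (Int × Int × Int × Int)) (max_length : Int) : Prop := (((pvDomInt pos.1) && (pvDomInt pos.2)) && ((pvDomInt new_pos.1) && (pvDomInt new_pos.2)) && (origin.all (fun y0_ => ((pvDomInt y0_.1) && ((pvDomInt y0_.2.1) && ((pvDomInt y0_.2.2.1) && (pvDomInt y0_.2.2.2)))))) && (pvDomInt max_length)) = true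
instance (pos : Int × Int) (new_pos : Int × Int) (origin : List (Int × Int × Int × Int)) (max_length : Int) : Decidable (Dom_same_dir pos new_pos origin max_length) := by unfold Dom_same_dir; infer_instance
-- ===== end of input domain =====

-- B replaces A's while-loop (mutable p, counter c counting up) by an early guard for
-- non-positive max_length plus a recursive walk over the parent chain counting the
-- REMAINING steps down to zero; objective: alternative decomposition, same cost.
-- Return-value equivalence only; neither program mutates its arguments.

-- Shared dict semantics: Python 'p in origin' / 'origin[p]' on the association list,
-- first match on the key (exact: a Python dict has unique keys, lookup is the match).
def lookOrigin (origin : List (Int × Int × Int × Int)) (p : Int × Int) : Option (Int × Int) :=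
  match origin with
  | [] => none
  | e :: rest => if (e.1, e.2.1) = p then some (e.2.2.1, e.2.2.2) else lookOrigin rest p

-- ===== PORT A =====
-- A's while loop: state (p, c); condition 'p in origin and c < max_length'; on exit return c == max_length.
def same_dirLoop (origin : List (Int × Int × Int × Int)) (v : Int × Int) (max_length : Int)
    (p : Int × Int) (c : Int) : Bool :=
  match lookOrigin origin p with
  | some prev =>
    if _h : c < max_length then
      if (p.1 - prev.1, p.2 - prev.2) ≠ v then false
      else same_dirLoop origin v max_length prev (c + 1)
    else decide (c = max_length)
  | none => decide (c = max_length)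
termination_by (max_length - c).toNat
decreasing_by omega

def same_dir (pos : Int × Int) (new_pos : Int × Int) (origin : List (Int × Int × Int × Int)) (max_length : Int) : Bool :=
  same_dirLoop origin (new_pos.1 - pos.1, new_pos.2 - pos.2) max_length pos 0

-- ===== PORT B =====
-- Source B's walk(p, remaining): remaining == 0 → True; p missing → False; wrong step → False; else recurse.
def walkB (origin : List (Int × Int × Int × Int)) (v : Int × Int) : (Int × Int) → Nat → Bool
  | _, 0 => true
  | p, n + 1 =>
    match lookOrigin origin p with
    | none => false
    | some prev =>
      if (p.1 - prev.1, p.2 - prev.2) ≠ v then false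
      else walkB origin v prev n

def same_dir_alt (pos : Int × Int) (new_pos : Int × Int) (origin : List (Int × Int × Int × Int)) (max_length : Int) : Bool :=
  if max_length ≤ 0 then decide (max_length = 0)
  else walkB origin (new_pos.1 - pos.1, new_pos.2 - pos.2) pos max_length.toNat

-- ===== PRECONDITION & SPEC =====
def Spec_same_dir (pos : Int × Int) (new_pos : Int × Int) (origin : List (Int × Int × Int × Int)) (max_length : Int) (out : Bool) : Prop := out = same_dir_alt pos new_pos origin max_length
instance (pos : Int × Int) (new_pos : Int × Int) (origin : List (Int × Int × Int × Int)) (max_length : Int) (out : Bool) : Decidable (Spec_same_dir pos new_pos origin max_length out) := by unfold Spec_same_dir; infer_instance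

-- ===== CLAIM (what is proved, stated in full; the proofs are below) =====
def Claim_equal_same_dir : Prop := ∀ (pos : Int × Int) (new_pos : Int × Int) (origin : List (Int × Int × Int × Int)) (max_length : Int), Dom_same_dir pos new_pos origin max_length → Spec_same_dir pos new_pos origin max_length (same_dir pos new_pos origin max_length)

-- ===== LEMMAS AND PROOFS =====
-- Loop/walk correspondence: with c ≤ M and n = (M - c).toNat, A's loop from (p, c)
-- returns exactly B's walk with n steps remaining.
theorem loop_eq_walk (origin : List (Int × Int × Int × Int)) (v : Int × Int) (M : Int) :
    ∀ (n : Nat) (p : Int × Int) (c : Int), c ≤ M → (M - c).toNat = n →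
      same_dirLoop origin v M p c = walkB origin v p n := by
  intro n
  induction n with
  | zero =>
    intro p c hc hn
    have hcM : c = M := by omega
    rw [same_dirLoop]
    cases hlook : lookOrigin origin p with
    | none => simp [walkB, hcM]
    | some prev => simp [walkB, hcM]
  | succ n ih =>
    intro p c hc hn
    have hlt : c < M := by omega
    rw [same_dirLoop]
    cases hlook : lookOrigin origin p with
    | none =>
      simp [walkB, hlook]
      omega
    | some prev =>
      simp only [hlt, dif_pos, walkB, hlook]
      by_cases hv : (p.1 - prev.1, p.2 - prev.2) = v
      · simp only [hv, ne_eq, not_true_eq_false, if_false]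
        exact ih prev (c + 1) (by omega) (by omega)
      · simp [hv]

-- ===== VERDICT (by name: the statement is the Claim_ definition above) =====
theorem same_dir_spec : Claim_equal_same_dir := by
  intro pos new_pos origin max_length _
  unfold Spec_same_dir same_dir same_dir_alt
  by_cases hM : max_length ≤ 0
  · rw [same_dirLoop]
    have h0 : ¬ ((0 : Int) < max_length) := by omega
    cases hlook : lookOrigin origin pos with
    | none => simp [hM]; omega
    | some prev => simp [h0, hM]; omega
  · rw [if_neg hM]
    exact loop_eq_walk origin _ max_length max_length.toNat pos 0 (by omega) (by omega)
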